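-- pv_equiv track=rewrite | github.com/altq33/HMIPAD-labs | labs/Lab1/algorithms_for_lists.py | delete_even_with_standart
-- ===== SOURCE A (Python) =====
-- def delete_even_with_standart(array: list[int]) -> list[int]:
-- 	if not array:
-- 		return []
-- 	min_el_index = array.index(min(array))
-- 	max_el_index = array.index(max(array))
-- 	if min_el_index > max_el_index:
-- 		min_el_index, max_el_index = max_el_index, min_el_index
--
-- 	return [el[1] for el in (filter(lambda x: not (x[1] % 2 == 0 and min_el_index < x[0] < max_el_index) , enumerate(array)))]
-- ===== SOURCE B (Python) =====
-- def delete_even_with_standart(array: list[int]) -> list[int]: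
--     if not array:
--         return []
--     mn, mx = min(array), max(array)
--     out = []
--     n = len(array)
--     i = 0
--     # phase 1: copy until the first boundary value (the min or the max) appears
--     while True:
--         x = array[i]
--         out.append(x)
--         i += 1
--         if x == mn:
--             t = mx
--             break
--         if x == mx:
--             t = mn
--             break
--     # phase 2: keep only odd numbers until the other boundary value appears,
--     # then copy the remainder verbatim
--     while i < n:
--         x = array[i]
--         if x == t:
--             out.extend(array[i:])
--             break
--         if x % 2 != 0:
--             out.append(x)
--         i += 1
--     return out
-- ===== Notes on version B (the rewrite author's own statement) =====
-- stated objective: alternative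
-- what changed: B never computes positions: instead of index()-based bounds and a positional filter, it runs a two-phase value-triggered state machine over the elements - copy until the first occurrence of the min or max value, then keep only odd numbers until the other extreme value appears, then copy the rest verbatim.
import Mathlib
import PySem

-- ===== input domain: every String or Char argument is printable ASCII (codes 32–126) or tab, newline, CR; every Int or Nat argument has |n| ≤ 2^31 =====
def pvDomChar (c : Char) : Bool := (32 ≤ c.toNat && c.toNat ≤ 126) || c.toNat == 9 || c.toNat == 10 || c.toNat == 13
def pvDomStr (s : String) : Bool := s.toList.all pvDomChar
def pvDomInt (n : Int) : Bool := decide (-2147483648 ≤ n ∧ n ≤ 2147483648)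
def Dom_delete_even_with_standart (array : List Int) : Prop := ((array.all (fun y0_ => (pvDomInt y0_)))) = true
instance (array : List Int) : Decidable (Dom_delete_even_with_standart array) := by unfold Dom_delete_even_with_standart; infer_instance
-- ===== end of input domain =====

-- B computes no positions at all: a two-phase value-triggered scan (copy until the first min-or-max
-- value, keep only odd numbers until the other extreme value, then copy the rest) replaces A's
-- index()-based bounds and positional filter; alternative algorithm, same cost.

-- ===== PORT A =====
def delete_even_with_standart (array : List Int) : List Int :=
  if array.isEmpty then []
  else
    let mn := (PySem.List.min? array (fun x => x)).getD 0
    let mx := (PySem.List.max? array (fun x => x)).getD 0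
    let mi := (PySem.List.index? array mn).getD 0
    let ma := (PySem.List.index? array mx).getD 0
    let lo := if mi > ma then ma else mi
    let hi := if mi > ma then mi else ma
    ((PySem.List.enumerate array 0).filter
      (fun x => !(PySem.Int.mod x.2 2 == 0 && decide ((lo : Int) < x.1) && decide (x.1 < (hi : Int))))).map (·.2)

-- ===== PORT B =====
-- phase 2 of Source B: keep only odd numbers until the other boundary value t appears, then copy the rest
def pvPhase2 (t : Int) : List Int → List Int
  | [] => []
  | x :: xs =>
    if x = t then x :: xs
    else if PySem.Int.mod x 2 != 0 then x :: pvPhase2 t xs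
    else pvPhase2 t xs

-- phase 1 of Source B: copy until the first boundary value (the min or the max) appears, then hand over
def pvPhase1 (mn mx : Int) : List Int → List Int
  | [] => []
  | x :: xs =>
    if x = mn then x :: pvPhase2 mx xs
    else if x = mx then x :: pvPhase2 mn xs
    else x :: pvPhase1 mn mx xs

def delete_even_with_standart_alt (array : List Int) : List Int :=
  if array.isEmpty then []
  else
    let mn := (PySem.List.min? array (fun x => x)).getD 0
    let mx := (PySem.List.max? array (fun x => x)).getD 0
    pvPhase1 mn mx array

-- ===== PRECONDITION & SPEC =====
def Spec_delete_even_with_standart (array : List Int) (out : List Int) : Prop := out = delete_even_with_standart_alt array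
instance (array : List Int) (out : List Int) : Decidable (Spec_delete_even_with_standart array out) := by unfold Spec_delete_even_with_standart; infer_instance

-- ===== CLAIM (what is proved, stated in full; the proofs are below) =====
def Claim_equal_delete_even_with_standart : Prop := ∀ (array : List Int), Dom_delete_even_with_standart array → Spec_delete_even_with_standart array (delete_even_with_standart array)

-- ===== LEMMAS AND PROOFS =====

-- proof-side recursion describing A's enumerate-filter with relative Int bounds
def pvG (lo hi : Int) : List Int → List Int
  | [] => []
  | x :: xs =>
    if PySem.Int.mod x 2 = 0 ∧ lo < 0 ∧ 0 < hi then pvG (lo - 1) (hi - 1) xs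
    else x :: pvG (lo - 1) (hi - 1) xs

-- first index of v (list length if absent), proof-side
def pvIdx (v : Int) : List Int → Nat
  | [] => 0
  | x :: xs => if x = v then 0 else pvIdx v xs + 1

lemma pvG_eq_filter (l : List Int) : ∀ (s lo hi : Int),
    ((PySem.List.enumerate l s).filter
      (fun x => !(PySem.Int.mod x.2 2 == 0 && decide (lo < x.1) && decide (x.1 < hi)))).map (·.2)
      = pvG (lo - s) (hi - s) l := by
  induction l with
  | nil => intro s lo hi; simp [PySem.List.enumerate_nil, pvG]
  | cons x xs ih =>
    intro s lo hi
    have ih' := ih (s + 1) lo hi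
    rw [show lo - (s + 1) = lo - s - 1 from by ring,
        show hi - (s + 1) = hi - s - 1 from by ring] at ih'
    rw [PySem.List.enumerate_cons, pvG,
        if_congr (show (PySem.Int.mod x 2 = 0 ∧ lo - s < 0 ∧ 0 < hi - s)
            ↔ (PySem.Int.mod x 2 = 0 ∧ lo < s ∧ s < hi) by
          constructor <;> rintro ⟨a, b, c⟩ <;> exact ⟨a, by omega, by omega⟩) rfl rfl]
    by_cases hc : PySem.Int.mod x 2 = 0 ∧ lo < s ∧ s < hi
    · have hdvd : 2 ∣ x := (PySem.Int.mod_eq_zero_iff_dvd x 2).mp hc.1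
      rw [if_pos hc]
      simp only [List.filter_cons]
      have hb : (!(PySem.Int.mod x 2 == 0 && decide (lo < s) && decide (s < hi))) = false := by
        simp [hdvd, hc.2.1, hc.2.2]
      simp only [hb]
      simpa using ih'
    · rw [if_neg hc]
      have hb : (!(PySem.Int.mod x 2 == 0 && decide (lo < s) && decide (s < hi))) = true := by
        by_cases h1 : PySem.Int.mod x 2 = 0 <;> by_cases h2 : lo < s <;>
          by_cases h3 : s < hi <;> simp_all
      simp only [List.filter_cons, hb]
      simpa using ih'

lemma pvG_triv : ∀ (l : List Int) (lo hi : Int), hi ≤ lo → pvG lo hi l = l := by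
  intro l
  induction l with
  | nil => intro lo hi h; rfl
  | cons x xs ih =>
    intro lo hi h
    rw [pvG, if_neg (by rintro ⟨-, b, c⟩; omega), ih _ _ (by omega)]

lemma pvG_all : ∀ (l : List Int) (lo hi : Int), hi ≤ 0 → pvG lo hi l = l := by
  intro l
  induction l with
  | nil => intro lo hi h; rfl
  | cons x xs ih =>
    intro lo hi h
    rw [pvG, if_neg (by rintro ⟨-, -, c⟩; omega), ih _ _ (by omega)]

lemma pvG_mid : ∀ (l : List Int) (lo hi : Int), lo < 0 →
    pvG lo hi l = (l.take hi.toNat).filter (fun x => PySem.Int.mod x 2 != 0) ++ l.drop hi.toNat := by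
  intro l
  induction l with
  | nil => intro lo hi h; simp [pvG]
  | cons x xs ih =>
    intro lo hi h
    by_cases hh : hi ≤ 0
    · rw [pvG_all _ _ _ hh]
      have h0 : hi.toNat = 0 := by omega
      simp [h0]
    · have h1 : hi.toNat = (hi - 1).toNat + 1 := by omega
      rw [pvG, h1]
      simp only [List.take_succ_cons, List.drop_succ_cons, List.filter_cons]
      by_cases hx : PySem.Int.mod x 2 = 0
      · rw [if_pos ⟨hx, h, by omega⟩]
        have hb : ((PySem.Int.mod x 2 != 0) : Bool) = false := by
          simp only [bne_eq_false_iff_eq]; exact hx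
        rw [hb]
        simp only [Bool.false_eq_true, if_false]
        exact ih (lo - 1) (hi - 1) (by omega)
      · rw [if_neg (by rintro ⟨a, -, -⟩; exact hx a)]
        have hb : ((PySem.Int.mod x 2 != 0) : Bool) = true := by
          rw [bne_iff_ne]; exact hx
        rw [hb]
        simp only [if_true, List.cons_append]
        rw [ih (lo - 1) (hi - 1) (by omega)]

-- phase 2 keeps the odd numbers before the first occurrence of t and everything from it on
lemma pvPhase2_eq (t : Int) : ∀ (l : List Int),
    pvPhase2 t l = (l.take (pvIdx t l)).filter (fun x => PySem.Int.mod x 2 != 0) ++ l.drop (pvIdx t l) := by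
  intro l
  induction l with
  | nil => simp [pvPhase2, pvIdx]
  | cons x xs ih =>
    rw [pvPhase2, pvIdx]
    by_cases hx : x = t
    · simp [hx]
    · rw [if_neg hx, if_neg hx]
      simp only [List.take_succ_cons, List.drop_succ_cons, List.filter_cons]
      by_cases ho : (PySem.Int.mod x 2 != 0) = true
      · rw [if_pos ho, ho]; simp only [if_true, List.cons_append]; rw [ih]
      · rw [if_neg ho, eq_false_of_ne_true ho]
        simp only [Bool.false_eq_true, if_false]; rw [ih]

-- if every element equals t, phase 2 is the identity
lemma pvPhase2_const (t : Int) : ∀ (l : List Int), (∀ y ∈ l, y = t) → pvPhase2 t l = l := by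
  intro l h
  cases l with
  | nil => rfl
  | cons x xs => rw [pvPhase2, if_pos (h x (by simp))]

-- the two-phase scan equals A's positional filter, with bounds = first indices of mn and mx
lemma pvPhase1_eq : ∀ (l : List Int) (mn mx : Int), (∀ y ∈ l, mn ≤ y ∧ y ≤ mx) →
    pvPhase1 mn mx l
      = pvG ((min (pvIdx mn l) (pvIdx mx l) : Nat) : Int) ((max (pvIdx mn l) (pvIdx mx l) : Nat) : Int) l := by
  intro l
  induction l with
  | nil => intro mn mx h; rfl
  | cons x xs ih =>
    intro mn mx h
    rw [pvPhase1, pvIdx, pvIdx]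
    by_cases hmn : x = mn
    · rw [if_pos hmn, if_pos hmn]
      by_cases hmx : x = mx
      · -- mn = mx: everything is equal, nothing is deleted
        rw [if_pos hmx]
        have hEq : mn = mx := hmn ▸ hmx
        rw [pvG_triv _ _ _ (by simp), pvPhase2_const mx xs (fun y hy => by
          have := h y (by simp [hy]); omega)]
      · rw [if_neg hmx]
        have h0 : min 0 (pvIdx mx xs + 1) = 0 := by omega
        have h1 : max 0 (pvIdx mx xs + 1) = pvIdx mx xs + 1 := by omega
        rw [h0, h1, pvG, if_neg (by rintro ⟨-, b, -⟩; simp at b),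
            pvG_mid xs _ _ (by omega), pvPhase2_eq,
            show (((pvIdx mx xs + 1 : Nat) : Int) - 1).toNat = pvIdx mx xs from by omega]
    · rw [if_neg hmn, if_neg hmn]
      by_cases hmx : x = mx
      · rw [if_pos hmx, if_pos hmx]
        have h0 : min (pvIdx mn xs + 1) 0 = 0 := by omega
        have h1 : max (pvIdx mn xs + 1) 0 = pvIdx mn xs + 1 := by omega
        rw [h0, h1, pvG, if_neg (by rintro ⟨-, b, -⟩; simp at b),
            pvG_mid xs _ _ (by omega), pvPhase2_eq,
            show (((pvIdx mn xs + 1 : Nat) : Int) - 1).toNat = pvIdx mn xs from by omega]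
      · rw [if_neg hmx, if_neg hmx, pvG,
            if_neg (by rintro ⟨-, b, -⟩; have : (0:Int) ≤ (min (pvIdx mn xs + 1) (pvIdx mx xs + 1) : Nat) := Int.natCast_nonneg _; omega)]
        have e1 : ((min (pvIdx mn xs + 1) (pvIdx mx xs + 1) : Nat) : Int) - 1
            = ((min (pvIdx mn xs) (pvIdx mx xs) : Nat) : Int) := by omega
        have e2 : ((max (pvIdx mn xs + 1) (pvIdx mx xs + 1) : Nat) : Int) - 1
            = ((max (pvIdx mn xs) (pvIdx mx xs) : Nat) : Int) := by omega
        rw [e1, e2, ih mn mx (fun y hy => h y (by simp [hy]))]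

-- first-occurrence index from PySem.List.index?, for members
lemma pvIndex?_getD (v : Int) : ∀ (l : List Int), v ∈ l → (PySem.List.index? l v).getD 0 = pvIdx v l := by
  intro l
  induction l with
  | nil => intro h; cases h
  | cons x xs ih =>
    intro h
    rw [pvIdx]
    by_cases hx : x = v
    · rw [if_pos hx, hx, PySem.List.index?_cons_self]; rfl
    · rw [if_neg hx, PySem.List.index?_cons_of_ne _ hx]
      have hv : v ∈ xs := by cases h with | head => exact absurd rfl hx | tail _ h => exact h
      cases hix : PySem.List.index? xs v with
      | none => exact absurd ((PySem.List.index?_eq_none_iff _ _).mp hix) (by simpa using hv)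
      | some k =>
        have := ih hv
        rw [hix] at this
        simp only [Option.map_some, Option.getD_some] at this ⊢
        omega

-- ===== VERDICT (by name: the statement is the Claim_ definition above) =====
theorem delete_even_with_standart_spec : Claim_equal_delete_even_with_standart := by
  unfold Claim_equal_delete_even_with_standart
  intro array _
  unfold Spec_delete_even_with_standart delete_even_with_standart delete_even_with_standart_alt
  by_cases he : array.isEmpty = true
  · simp [he]
  · simp only [he]
    simp only [Bool.false_eq_true, if_false]
    have hne : array ≠ [] := by simpa [List.isEmpty_iff] using he
    obtain ⟨mn, hmn⟩ : ∃ m, PySem.List.min? array (fun x => x) = some m := by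
      cases hm : PySem.List.min? array (fun x => x) with
      | none => exact absurd ((PySem.List.min?_eq_none_iff _ _).mp hm) hne
      | some m => exact ⟨m, rfl⟩
    obtain ⟨mx, hmx⟩ : ∃ m, PySem.List.max? array (fun x => x) = some m := by
      cases hm : PySem.List.max? array (fun x => x) with
      | none => exact absurd ((PySem.List.max?_eq_none_iff _ _).mp hm) hne
      | some m => exact ⟨m, rfl⟩
    have hmnMem := PySem.List.min?_mem hmn
    have hmxMem := PySem.List.max?_mem hmx
    have hbound : ∀ y ∈ array, mn ≤ y ∧ y ≤ mx :=
      fun y hy => ⟨PySem.List.min?_isMin hmn y hy, PySem.List.max?_isMax hmx y hy⟩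
    rw [hmn, hmx]
    simp only [Option.getD_some]
    rw [pvIndex?_getD mn array hmnMem, pvIndex?_getD mx array hmxMem]
    set a := pvIdx mn array
    set b := pvIdx mx array
    have hlo : (if a > b then b else a) = min a b := by split <;> omega
    have hhi : (if a > b then a else b) = max a b := by split <;> omega
    rw [hlo, hhi]
    have hA := pvG_eq_filter array 0 ((min a b : Nat) : Int) ((max a b : Nat) : Int)
    rw [sub_zero, sub_zero] at hA
    rw [hA, pvPhase1_eq array mn mx hbound]
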